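-- pv_equiv track=rewrite | github.com/NahinM/CSE331 | Checkers/python/package/CheckerFuns/checkerFun_kkp_Fall25.py | question20
-- ===== SOURCE A (Python) =====
-- def question20(L:str) -> bool:
--     one,zero = 0,0
--     for c in L:
--         if c=='0':
--             zero+=1
--             one = 0
--         else:
--             one+=1
--             zero = 0
--         if zero>=2: return False
--         if one>=2: return True
--     return True
-- ===== SOURCE B (Python) =====
-- import re
--
-- def question20(L: str) -> bool:
--     m = re.search(r'00|[^0][^0]', L)
--     return m is None or m.group()[0] != '0'
-- ===== Notes on version B (the rewrite author's own statement) =====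
-- stated objective: idiomatic
-- what changed: Replaced the run-length counter state machine with a single regex search for the leftmost adjacent same-category pair ('00' or two non-'0' chars), classifying its first character.
import Mathlib
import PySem

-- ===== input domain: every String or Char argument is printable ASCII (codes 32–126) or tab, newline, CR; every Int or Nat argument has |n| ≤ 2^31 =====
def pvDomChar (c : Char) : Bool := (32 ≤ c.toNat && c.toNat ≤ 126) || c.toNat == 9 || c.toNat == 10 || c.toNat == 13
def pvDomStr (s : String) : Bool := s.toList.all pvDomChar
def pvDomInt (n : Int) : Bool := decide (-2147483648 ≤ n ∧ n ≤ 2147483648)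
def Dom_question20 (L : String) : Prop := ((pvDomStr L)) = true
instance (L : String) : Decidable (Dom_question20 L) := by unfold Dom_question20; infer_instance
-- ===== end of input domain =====

-- B replaces A's counter state machine with a leftmost same-category-pair search (regex '00|[^0][^0]' in Python); idiomatic, same cost.

-- ===== PORT A =====
-- the for-loop over L with counters one, zero and early returns
def question20Loop : List Char → Int → Int → Bool
  | [], _, _ => true
  | c :: cs, one, zero =>
    if c = '0' then
      let zero' := zero + 1
      let one' : Int := 0
      if zero' ≥ 2 then false
      else if one' ≥ 2 then true
      else question20Loop cs one' zero'
    else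
      let one' := one + 1
      let zero' : Int := 0
      if zero' ≥ 2 then false
      else if one' ≥ 2 then true
      else question20Loop cs one' zero'

def question20 (L : String) : Bool := question20Loop L.toList 0 0

-- ===== PORT B =====
-- port of re.search(r'00|[^0][^0]', L): leftmost adjacent pair of same category ('0' vs non-'0'),
-- returning the first character of the match (none = no match)
def question20Search : List Char → Option Char
  | [] => none
  | [_] => none
  | a :: b :: cs =>
    if (a = '0') = (b = '0') then some a else question20Search (b :: cs)

def question20_alt (L : String) : Bool :=
  match question20Search L.toList with
  | none => true
  | some c => decide (c ≠ '0')

-- ===== PRECONDITION & SPEC =====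
def Spec_question20 (L : String) (out : Bool) : Prop := out = question20_alt L
instance (L : String) (out : Bool) : Decidable (Spec_question20 L out) := by unfold Spec_question20; infer_instance

-- ===== CLAIM (what is proved, stated in full; the proofs are below) =====
def Claim_equal_question20 : Prop := ∀ (L : String), Dom_question20 L → Spec_question20 L (question20 L)

-- ===== LEMMAS AND PROOFS =====

-- invariant: after processing a char p, the counters encode exactly p's category
theorem question20Loop_eq_search (cs : List Char) (p : Char) :
    question20Loop cs (if p = '0' then 0 else 1) (if p = '0' then 1 else 0) =
      (match question20Search (p :: cs) with
       | none => true
       | some c => decide (c ≠ '0')) := by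
  induction cs generalizing p with
  | nil => simp [question20Loop, question20Search]
  | cons c cs ih =>
    by_cases hp : p = '0' <;> by_cases hc : c = '0' <;>
      simp [question20Loop, question20Search, hp, hc] <;>
      simpa [hc] using ih c

-- ===== VERDICT (by name: the statement is the Claim_ definition above) =====
theorem question20_spec : Claim_equal_question20 := by
  intro L _
  unfold Spec_question20 question20 question20_alt
  cases h : L.toList with
  | nil => simp [question20Loop, question20Search]
  | cons p cs =>
    have := question20Loop_eq_search cs p
    by_cases hp : p = '0' <;>
      simp [question20Loop, hp] <;> simpa [hp] using this
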